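-- pv_equiv track=rewrite | github.com/MrBrantCode/unitest_baseline | mut_generate/mist_train_cf/cf_10881/solution.py | flatten_and_remove_duplicates
-- ===== SOURCE A (Python) =====
-- def flatten_and_remove_duplicates(arr):
--     # Flatten the 2D array
--     flattened = []
--     for row in arr:
--         flattened.extend(row)
--
--     # Sort the flattened list
--     flattened.sort()
--
--     # Create an empty result list
--     result = []
--
--     # Iterate through the sorted list
--     for i in range(len(flattened)):
--         # Remove duplicates and add elements to the result list
--         if i == 0 or flattened[i] != flattened[i - 1]:
--             result.append(flattened[i])
--
--     # Return the result list
--     return result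
-- ===== SOURCE B (Python) =====
-- def flatten_and_remove_duplicates(arr):
--     return sorted({x for row in arr for x in row})
-- ===== Notes on version B (the rewrite author's own statement) =====
-- stated objective: faster
-- what changed: Replaces the explicit flatten loop plus sort plus adjacent-comparison index dedup loop with a set comprehension that collapses duplicates by hashing, then one sort of only the distinct elements.
import Mathlib
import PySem

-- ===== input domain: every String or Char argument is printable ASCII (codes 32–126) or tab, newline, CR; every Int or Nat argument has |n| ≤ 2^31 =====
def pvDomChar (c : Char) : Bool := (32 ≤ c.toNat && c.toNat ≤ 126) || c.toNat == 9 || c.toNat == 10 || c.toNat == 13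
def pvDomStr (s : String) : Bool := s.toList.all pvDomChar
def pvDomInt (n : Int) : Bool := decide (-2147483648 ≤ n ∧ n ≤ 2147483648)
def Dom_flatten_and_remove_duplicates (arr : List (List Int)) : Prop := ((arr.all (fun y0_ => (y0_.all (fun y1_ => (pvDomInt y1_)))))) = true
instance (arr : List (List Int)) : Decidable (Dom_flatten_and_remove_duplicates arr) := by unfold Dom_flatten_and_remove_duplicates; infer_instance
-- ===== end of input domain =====

-- B replaces A's flatten loop + sort + adjacent-comparison dedup loop by a set
-- comprehension (hash dedup) followed by one sort of the distinct elements (idiomatic).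

-- ===== PORT A =====
-- flatten by extending, sort in place, then the index loop keeping elements
-- that differ from their left neighbour.
def flatten_and_remove_duplicates (arr : List (List Int)) : List Int :=
  let flattened := arr.foldl (fun acc row => acc ++ row) []
  let flattened := PySem.List.sorted flattened (fun x => x)
  (PySem.List.pyRange 0 (flattened.length : Int) 1).foldl
    (fun result i =>
      if i = 0 ∨ PySem.List.pyGetD flattened i 0 ≠ PySem.List.pyGetD flattened (i - 1) 0
      then result ++ [PySem.List.pyGetD flattened i 0]
      else result) []

-- ===== PORT B =====
-- sorted({x for row in arr for x in row})
def flatten_and_remove_duplicates_alt (arr : List (List Int)) : List Int :=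
  PySem.List.sorted (PySem.Set.ofList (arr.flatMap (fun row => row))) (fun x => x)

-- ===== PRECONDITION & SPEC =====
def Spec_flatten_and_remove_duplicates (arr : List (List Int)) (out : List Int) : Prop := out = flatten_and_remove_duplicates_alt arr
instance (arr : List (List Int)) (out : List Int) : Decidable (Spec_flatten_and_remove_duplicates arr out) := by unfold Spec_flatten_and_remove_duplicates; infer_instance

-- ===== CLAIM (what is proved, stated in full; the proofs are below) =====
def Claim_equal_flatten_and_remove_duplicates : Prop := ∀ (arr : List (List Int)), Dom_flatten_and_remove_duplicates arr → Spec_flatten_and_remove_duplicates arr (flatten_and_remove_duplicates arr)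

-- ===== LEMMAS AND PROOFS =====

-- structural form of A's dedup loop: keep an element iff it differs from the previous kept origin
def pvChase (p : Int) : List Int → List Int
  | [] => []
  | x :: xs => if x ≠ p then x :: pvChase x xs else pvChase p xs

def pvDest : List Int → List Int
  | [] => []
  | x :: xs => x :: pvChase x xs

-- A's index loop from position j ≥ 1 computes pvChase of the tail
lemma pvLoopA (L : List Int) (j : Nat) (acc : List Int) (hj : 1 ≤ j) :
    (PySem.List.pyRange (j : Int) (L.length : Int) 1).foldl
      (fun result i =>
        if i = 0 ∨ PySem.List.pyGetD L i 0 ≠ PySem.List.pyGetD L (i - 1) 0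
        then result ++ [PySem.List.pyGetD L i 0]
        else result) acc
    = acc ++ pvChase (L.getD (j - 1) 0) (L.drop j) := by
  by_cases hlt : j < L.length
  · rw [PySem.List.pyRange_one_cons (by exact_mod_cast hlt)]
    have h1 : ((j : Int)) - 1 = ((j - 1 : Nat) : Int) := by omega
    have h2 : ((j : Int)) + 1 = ((j + 1 : Nat) : Int) := by omega
    simp only [List.foldl_cons, h1, h2, PySem.List.pyGetD_natCast]
    have hj0 : ¬ ((j : Int) = 0) := by omega
    have hdrop : L.drop j = L[j] :: L.drop (j + 1) := List.drop_eq_getElem_cons hlt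
    have hgd : L.getD j 0 = L[j] := List.getD_eq_getElem L 0 hlt
    by_cases hne : L.getD j 0 ≠ L.getD (j - 1) 0
    · rw [if_pos (Or.inr hne)]
      rw [pvLoopA L (j + 1) _ (by omega)]
      simp only [Nat.add_sub_cancel, hdrop, pvChase, hgd] at *
      rw [if_pos (by simpa [hgd] using hne)]
      simp
    · push Not at hne
      rw [if_neg (by simp only [not_or, ne_eq, not_not]; exact ⟨by omega, by simpa [List.getD] using hne⟩)]
      rw [pvLoopA L (j + 1) _ (by omega)]
      simp only [Nat.add_sub_cancel, hdrop, pvChase, hgd] at *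
      rw [if_neg (by simpa [hgd] using hne), hne]
  · rw [PySem.List.pyRange_one_eq_nil (by exact_mod_cast Nat.le_of_not_lt hlt)]
    rw [List.drop_of_length_le (Nat.le_of_not_lt hlt)]
    simp [pvChase]
termination_by L.length - j

-- on a weakly increasing list, pvDest is strictly increasing and keeps the same elements
lemma pvChase_sound : ∀ (xs : List Int) (p : Int), (p :: xs).Pairwise (· ≤ ·) →
    (p :: pvChase p xs).Pairwise (· < ·) ∧ (∀ a, a ∈ p :: pvChase p xs ↔ a ∈ p :: xs) := by
  intro xs
  induction xs with
  | nil => intro p _; simp [pvChase]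
  | cons x xs ih =>
    intro p hp
    by_cases hx : x ≠ p
    · have htail : (x :: xs).Pairwise (· ≤ ·) := hp.tail
      obtain ⟨hpw, hmem⟩ := ih x htail
      have hple : p ≤ x := (List.pairwise_cons.mp hp).1 x (by simp)
      have hplt : p < x := lt_of_le_of_ne hple (Ne.symm hx)
      constructor
      · rw [pvChase]
        rw [if_pos hx]
        refine List.pairwise_cons.mpr ⟨?_, hpw⟩
        intro b hb
        rcases List.mem_cons.mp hb with h | h
        · exact h ▸ hplt
        · exact lt_trans hplt ((List.pairwise_cons.mp hpw).1 b h)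
      · intro a
        rw [pvChase, if_pos hx]
        have := hmem a
        simp only [List.mem_cons] at this ⊢
        tauto
    · push Not at hx
      subst hx
      have htail : (x :: xs).Pairwise (· ≤ ·) := hp.tail
      obtain ⟨hpw, hmem⟩ := ih x htail
      constructor
      · rw [pvChase]; simpa using hpw
      · intro a
        rw [pvChase]
        simp only [ne_eq, not_true_eq_false, if_false] at *
        rw [show (pvChase x xs) = pvChase x xs from rfl]
        have := hmem a
        simp only [List.mem_cons] at *
        tauto

lemma pvDest_sound (L : List Int) (h : L.Pairwise (· ≤ ·)) :
    (pvDest L).Pairwise (· < ·) ∧ (∀ a, a ∈ pvDest L ↔ a ∈ L) := by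
  cases L with
  | nil => simp [pvDest]
  | cons x xs => exact pvChase_sound xs x h

-- A's index loop computes pvDest
lemma pvA_eq_dest (L : List Int) :
    (PySem.List.pyRange 0 (L.length : Int) 1).foldl
      (fun result i =>
        if i = 0 ∨ PySem.List.pyGetD L i 0 ≠ PySem.List.pyGetD L (i - 1) 0
        then result ++ [PySem.List.pyGetD L i 0]
        else result) []
    = pvDest L := by
  cases L with
  | nil => simp [pvDest, PySem.List.pyRange_one_eq_nil]
  | cons x xs =>
    rw [PySem.List.pyRange_one_cons (by exact_mod_cast Nat.succ_pos xs.length)]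
    simp only [List.foldl_cons]
    simp only [true_or, if_true, List.nil_append]
    rw [show ((0:Int) + 1) = ((1:Nat):Int) by norm_num]
    rw [pvLoopA (x :: xs) 1 _ (le_refl 1)]
    simp [pvDest, List.getD, PySem.List.pyGetD_zero_cons]

-- ===== VERDICT (by name: the statement is the Claim_ definition above) =====
theorem flatten_and_remove_duplicates_spec : Claim_equal_flatten_and_remove_duplicates := by
  intro arr _
  unfold Spec_flatten_and_remove_duplicates flatten_and_remove_duplicates flatten_and_remove_duplicates_alt
  rw [PySem.List.foldl_append_eq_flatMap (fun row => row) arr []]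
  simp only [List.nil_append]
  set fl := arr.flatMap (fun row => row) with hfl
  set L := PySem.List.sorted fl (fun x => x) with hL
  rw [pvA_eq_dest L]
  have hpw : L.Pairwise (· ≤ ·) := PySem.List.sorted_pairwise fl (fun x => x)
  obtain ⟨hlt, hmem⟩ := pvDest_sound L hpw
  symm
  apply PySem.List.sorted_eq_of_perm_of_pairwise_lt
  · rw [List.perm_ext_iff_of_nodup (hlt.imp ne_of_lt) (PySem.Set.nodup_ofList fl)]
    intro a
    rw [hmem a, PySem.Set.mem_ofList, PySem.List.mem_sorted]
  · exact hlt
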